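-- pv_equiv track=rewrite | github.com/raja1106/Leetcode | string/paypal.py | can_form_step
-- ===== SOURCE A (Python) =====
-- from collections import defaultdict, Counter
--
-- def can_form_step(s1, s2):
--     # s1 should be shorter by exactly one letter
--     if len(s1) + 1 != len(s2):
--         return False
--
--     # Count frequencies of each character
--     count1 = Counter(s1)
--     count2 = Counter(s2)
--
--     # Check if we can form s2 by adding exactly one letter to s1
--     diff = 0
--     for char in count2:
--         if count2[char] > count1.get(char, 0):
--             diff += count2[char] - count1.get(char, 0)
--         if diff > 1:
--             return False
--
--     return diff == 1
-- ===== SOURCE B (Python) =====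
-- def can_form_step(s1, s2):
--     if len(s1) + 1 != len(s2):
--         return False
--     a = sorted(s1)
--     b = sorted(s2)
--     i = 0
--     skips = 0
--     for j in range(len(b)):
--         if i < len(a) and a[i] == b[j]:
--             i += 1
--         else:
--             skips += 1
--             if skips > 1:
--                 return False
--     return skips == 1
-- ===== Notes on version B (the rewrite author's own statement) =====
-- stated objective: alternative
-- what changed: Replaces A's Counter-frequency comparison (count every char of both strings, sum the per-char surplus of s2 over s1) with a two-pointer merge over the two sorted strings that allows at most one unmatched character of s2.
import Mathlib
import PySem

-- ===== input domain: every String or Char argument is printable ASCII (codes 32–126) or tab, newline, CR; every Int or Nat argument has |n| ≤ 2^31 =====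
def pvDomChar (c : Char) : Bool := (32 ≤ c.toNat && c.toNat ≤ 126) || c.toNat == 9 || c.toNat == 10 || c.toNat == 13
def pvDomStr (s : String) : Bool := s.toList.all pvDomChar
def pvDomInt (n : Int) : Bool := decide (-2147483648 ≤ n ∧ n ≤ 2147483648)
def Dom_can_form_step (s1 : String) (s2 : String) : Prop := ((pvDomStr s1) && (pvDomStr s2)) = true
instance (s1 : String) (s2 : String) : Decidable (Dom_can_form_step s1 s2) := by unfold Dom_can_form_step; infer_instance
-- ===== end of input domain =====

-- B replaces A's Counter-frequency comparison with a two-pointer merge over the two sorted strings (alternative decomposition, same overall cost up to the sort).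

-- ===== PORT A =====
-- the 'for char in count2' loop with its early 'return False'
def loopA (count1 count2 : PySem.Dict Char Int) : List Char → Int → Bool
  | [], diff => diff == 1
  | c :: ks, diff =>
    let diff' := if PySem.Dict.getD count2 c 0 > PySem.Dict.getD count1 c 0
                 then diff + (PySem.Dict.getD count2 c 0 - PySem.Dict.getD count1 c 0)
                 else diff
    if diff' > 1 then false else loopA count1 count2 ks diff'

def can_form_step (s1 : String) (s2 : String) : Bool :=
  if PySem.Str.len s1 + 1 ≠ PySem.Str.len s2 then false
  else
    loopA (PySem.Dict.counter s1.toList) (PySem.Dict.counter s2.toList)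
      (PySem.Dict.keys (PySem.Dict.counter s2.toList)) 0

-- ===== PORT B =====
-- the 'for j in range(len(b))' loop: first arg = a[i:], second = b[j:], third = skips
def mergeB : List Char → List Char → Int → Bool
  | _, [], skips => skips == 1
  | [], _ :: b, skips => if skips + 1 > 1 then false else mergeB [] b (skips + 1)
  | x :: a, c :: b, skips =>
    if x = c then mergeB a b skips
    else if skips + 1 > 1 then false else mergeB (x :: a) b (skips + 1)

def can_form_step_alt (s1 : String) (s2 : String) : Bool :=
  if PySem.Str.len s1 + 1 ≠ PySem.Str.len s2 then false
  else
    mergeB (PySem.List.sorted s1.toList (fun x => x) false)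
      (PySem.List.sorted s2.toList (fun x => x) false) 0

-- ===== PRECONDITION & SPEC =====
def Spec_can_form_step (s1 : String) (s2 : String) (out : Bool) : Prop := out = can_form_step_alt s1 s2
instance (s1 : String) (s2 : String) (out : Bool) : Decidable (Spec_can_form_step s1 s2 out) := by unfold Spec_can_form_step; infer_instance

-- ===== CLAIM (what is proved, stated in full; the proofs are below) =====
def Claim_equal_can_form_step : Prop := ∀ (s1 : String) (s2 : String), Dom_can_form_step s1 s2 → Spec_can_form_step s1 s2 (can_form_step s1 s2)

-- ===== LEMMAS AND PROOFS =====

-- A's per-key surplus of s2's count over s1's count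
def surplus (count1 count2 : PySem.Dict Char Int) (c : Char) : Int :=
  if PySem.Dict.getD count2 c 0 > PySem.Dict.getD count1 c 0
  then PySem.Dict.getD count2 c 0 - PySem.Dict.getD count1 c 0
  else 0

lemma surplus_nonneg (count1 count2 : PySem.Dict Char Int) (c : Char) :
    0 ≤ surplus count1 count2 c := by
  unfold surplus; split <;> omega

-- A's loop returns true iff the accumulated surplus totals exactly 1
lemma loopA_true (count1 count2 : PySem.Dict Char Int) (ks : List Char) (d : Int) :
    loopA count1 count2 ks d = true ↔ d + (ks.map (surplus count1 count2)).sum = 1 := by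
  induction ks generalizing d with
  | nil => simp [loopA]
  | cons c ks ih =>
    have hterm := surplus_nonneg count1 count2 c
    have hrest : 0 ≤ (ks.map (surplus count1 count2)).sum :=
      List.sum_nonneg (by intro x hx; obtain ⟨c', _, rfl⟩ := List.mem_map.mp hx
                          exact surplus_nonneg _ _ _)
    have hstep : (if PySem.Dict.getD count2 c 0 > PySem.Dict.getD count1 c 0
                  then d + (PySem.Dict.getD count2 c 0 - PySem.Dict.getD count1 c 0)
                  else d) = d + surplus count1 count2 c := by
      unfold surplus; split <;> omega
    simp only [loopA, hstep, List.map_cons, List.sum_cons]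
    split
    · constructor
      · intro h; exact absurd h (by simp)
      · intro h; omega
    · rw [ih (d + surplus count1 count2 c)]
      constructor <;> intro h <;> omega

-- B's loop returns true iff the rest of a is a sublist of the rest of b,
-- under the running invariant skips + |b| = |a| + 1, 0 ≤ skips
lemma mergeB_true : ∀ (b a : List Char) (s : Int), 0 ≤ s →
    s + (b.length : Int) = (a.length : Int) + 1 →
    (mergeB a b s = true ↔ a.Sublist b) := by
  intro b
  induction b with
  | nil =>
    intro a s hs hlen
    simp only [mergeB, List.length_nil] at *
    constructor
    · intro h
      have hs1 : s = 1 := by simpa using h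
      have : (a.length : Int) = 0 := by omega
      simp [List.length_eq_zero_iff.mp (by exact_mod_cast this)]
    · intro h
      have ha : a = [] := List.sublist_nil.mp h
      subst ha
      simp at hlen
      simp [show s = 1 by omega]
  | cons c b ih =>
    intro a s hs hlen
    match a with
    | [] =>
      simp only [mergeB]
      split
      · -- skips would exceed 1, but the invariant forces s = 0 here
        exfalso
        simp only [List.length_cons, List.length_nil] at hlen
        have : (0:Int) ≤ (b.length : Int) := by positivity
        omega
      · rw [ih [] (s+1) (by omega) (by simp at hlen ⊢; omega)]
        simp
    | x :: a' =>
      by_cases hxc : x = c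
      · subst hxc
        have hred : mergeB (x :: a') (x :: b) s = mergeB a' b s := by
          simp [mergeB]
        rw [hred, ih a' s hs (by simp at hlen ⊢; omega)]
        exact (List.cons_sublist_cons).symm
      · have hsub : (x :: a').Sublist (c :: b) ↔ (x :: a').Sublist b := by
          constructor
          · intro h
            rcases List.sublist_cons_iff.mp h with h' | ⟨r, hr, hr'⟩
            · exact h'
            · exact (hxc (List.cons_eq_cons.mp hr).1).elim
          · intro h; exact h.trans (List.sublist_cons_self c b)
        simp only [mergeB, if_neg hxc]
        split
        · -- s = 1 already: a genuine sublist is impossible by length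
          constructor
          · intro h; exact absurd h (by simp)
          · intro h
            exfalso
            have hlb : (x :: a').length ≤ b.length := (hsub.mp h).length_le
            simp only [List.length_cons] at hlb hlen
            push_cast at hlen
            omega
        · rw [ih (x :: a') (s+1) (by omega) (by simp at hlen ⊢; omega)]
          exact hsub.symm

-- a sum of counts over a Finset of chars is a count of elements
lemma sum_count_finset (S : Finset Char) (l : List Char) :
    ∑ a ∈ S, (l.count a : ℤ) = (l.countP (fun c => decide (c ∈ S)) : ℤ) := by
  induction l with
  | nil => simp
  | cons x l ih =>
    have h1 : ∑ a ∈ S, ((x :: l).count a : ℤ)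
        = ∑ a ∈ S, ((l.count a : ℤ) + if a = x then 1 else 0) := by
      apply Finset.sum_congr rfl
      intro a _
      rw [List.count_cons]
      by_cases hax : a = x
      · subst hax; simp
      · have hxa : ¬ x = a := fun h => hax h.symm
        simp [hax, hxa]
    rw [h1, Finset.sum_add_distrib, ih, Finset.sum_ite_eq' S x (fun _ => (1:ℤ))]
    by_cases hx : x ∈ S <;> simp [hx]

-- s1's count-deficit against s2 at one char
def defect (l1 l2 : List Char) (c : Char) : Int :=
  if (l1.count c : Int) > (l2.count c : Int) then (l1.count c : Int) - (l2.count c : Int) else 0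

lemma surplus_counter_eq (l1 l2 : List Char) (c : Char) :
    surplus (PySem.Dict.counter l1) (PySem.Dict.counter l2) c
      = ((l2.count c : Int) - (l1.count c : Int)) + defect l1 l2 c := by
  unfold surplus defect
  simp only [PySem.Dict.getD_counter]
  split <;> split <;> omega

-- main arithmetic bridge: the surplus sum over the distinct chars of l2 equals 1
-- iff every char occurs in l1 at most as often as in l2 (given |l2| = |l1| + 1)
lemma surplus_sum_iff (l1 l2 : List Char) (hlen : l2.length = l1.length + 1) :
    ((PySem.Set.ofList l2).map (surplus (PySem.Dict.counter l1) (PySem.Dict.counter l2))).sum = 1 ↔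
      ∀ c, l1.count c ≤ l2.count c := by
  set F := surplus (PySem.Dict.counter l1) (PySem.Dict.counter l2) with hF
  have hnodup := PySem.Set.nodup_ofList l2
  have htf : (PySem.Set.ofList l2).toFinset = l2.toFinset := by
    ext c; simp [PySem.Set.mem_ofList]
  have h0 : ((PySem.Set.ofList l2).map F).sum = ∑ c ∈ l2.toFinset, F c := by
    rw [← List.sum_toFinset F hnodup, htf]
  have h1 : ∑ c ∈ l2.toFinset, F c
      = (∑ c ∈ l2.toFinset, ((l2.count c : ℤ) - (l1.count c : ℤ)))
        + ∑ c ∈ l2.toFinset, defect l1 l2 c := by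
    rw [← Finset.sum_add_distrib]
    exact Finset.sum_congr rfl (fun c _ => surplus_counter_eq l1 l2 c)
  have h2 : ∑ c ∈ l2.toFinset, (l2.count c : ℤ) = (l2.length : ℤ) := by
    rw [sum_count_finset]
    congr 1
    exact List.countP_eq_length.mpr (fun a ha => by simp [ha])
  set m : ℕ := l1.countP (fun c => decide (c ∈ l2.toFinset)) with hm
  have h3 : ∑ c ∈ l2.toFinset, (l1.count c : ℤ) = (m : ℤ) := sum_count_finset _ _
  set p : ℤ := ∑ c ∈ l2.toFinset, defect l1 l2 c with hp
  have hpnn : 0 ≤ p := Finset.sum_nonneg (fun c _ => by unfold defect; split <;> omega)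
  have hmle : m ≤ l1.length := List.countP_le_length
  have htotal : ((PySem.Set.ofList l2).map F).sum = ((l2.length : ℤ) - m) + p := by
    rw [h0, h1, Finset.sum_sub_distrib, h2, h3]
  rw [htotal]
  constructor
  · intro h c
    have hm1 : m = l1.length ∧ p = 0 := by
      constructor <;> omega
    have hpz : ∀ c ∈ l2.toFinset, defect l1 l2 c = 0 :=
      (Finset.sum_eq_zero_iff_of_nonneg (fun c _ => by unfold defect; split <;> omega)).mp hm1.2
    by_cases hc2 : c ∈ l2
    · have := hpz c (List.mem_toFinset.mpr hc2)
      unfold defect at this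
      split at this <;> omega
    · have hc2' : l2.count c = 0 := List.count_eq_zero.mpr hc2
      by_contra hlt
      have hc1 : c ∈ l1 := List.count_pos_iff.mp (by omega)
      have hmem := List.countP_eq_length.mp hm1.1 c hc1
      rw [decide_eq_true_eq, List.mem_toFinset] at hmem
      exact hc2 hmem
  · intro h
    have hmeq : m = l1.length := by
      apply List.countP_eq_length.mpr
      intro a ha
      have h1a : 0 < l1.count a := List.count_pos_iff.mpr ha
      have h2a : a ∈ l2 := List.count_pos_iff.mp (lt_of_lt_of_le h1a (h a))
      simp [h2a]
    have hpz : p = 0 := Finset.sum_eq_zero (fun c _ => by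
      have := h c; unfold defect; split <;> omega)
    omega

lemma sorted_sublist_iff (l1 l2 : List Char) :
    (PySem.List.sorted l1 (fun x => x) false).Sublist (PySem.List.sorted l2 (fun x => x) false) ↔
      ∀ c, l1.count c ≤ l2.count c := by
  constructor
  · intro h c
    have := h.subperm.count_le c
    rwa [(PySem.List.sorted_perm l1 (fun x => x) false).count c,
         (PySem.List.sorted_perm l2 (fun x => x) false).count c] at this
  · intro h
    have hsp : l1.Subperm l2 := List.subperm_ext_iff.mpr (fun x _ => h x)
    have hsp' : (PySem.List.sorted l1 (fun x => x) false).Subperm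
        (PySem.List.sorted l2 (fun x => x) false) :=
      ((PySem.List.sorted_perm l1 (fun x => x) false).subperm.trans hsp).trans
        (PySem.List.sorted_perm l2 (fun x => x) false).symm.subperm
    exact List.sublist_of_subperm_of_pairwise hsp'
      (PySem.List.sorted_pairwise l1 (fun x => x))
      (PySem.List.sorted_pairwise l2 (fun x => x))

-- ===== VERDICT (by name: the statement is the Claim_ definition above) =====
theorem can_form_step_spec : Claim_equal_can_form_step := by
  intro s1 s2 _
  unfold Spec_can_form_step can_form_step can_form_step_alt
  by_cases hc : PySem.Str.len s1 + 1 ≠ PySem.Str.len s2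
  · rw [if_pos hc, if_pos hc]
  · rw [if_neg hc, if_neg hc]
    rw [not_ne_iff] at hc
    have e1 := PySem.Str.len_eq s1
    have e2 := PySem.Str.len_eq s2
    have hlen : s2.toList.length = s1.toList.length + 1 := by omega
    rw [Bool.eq_iff_iff, loopA_true, PySem.Dict.keys_counter,
        mergeB_true _ _ _ le_rfl (by rw [PySem.List.length_sorted, PySem.List.length_sorted]; omega)]
    rw [sorted_sublist_iff]
    have := surplus_sum_iff s1.toList s2.toList hlen
    constructor
    · intro h; exact this.mp (by omega)
    · intro h; have := this.mpr h; omega
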